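-- pv_equiv track=rewrite | github.com/tlamDson/Advent_of_code | Day_7/Day_7part_2.py | solve_quantum_manifold
-- ===== SOURCE A (Python) =====
-- from collections import defaultdict
--
-- def solve_quantum_manifold(input_data):
--     lines = [line for line in input_data.split('\n') if line]
--
--     if not lines:
--         return "Error: Empty input."
--
--     max_len = max(len(line) for line in lines)
--     padded_lines = [line.ljust(max_len) for line in lines]
--
--     timelines = defaultdict(int)
--     start_row = -1
--
--     for r, line in enumerate(padded_lines):
--         if 'S' in line:
--             timelines[line.index('S')] = 1
--             start_row = r
--             break
--
--     if start_row == -1: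
--         return 0
--
--     total_finished_timelines = 0
--
--     for r in range(start_row + 1, len(padded_lines)):
--         if not timelines:
--             break
--
--         next_timelines = defaultdict(int)
--         current_line = padded_lines[r]
--
--         for col, count in timelines.items():
--             if col < 0 or col >= max_len:
--                 total_finished_timelines += count
--                 continue
--
--             char = current_line[col]
--
--             if char == '^':
--                 next_timelines[col - 1] += count
--                 next_timelines[col + 1] += count
--             else:
--                 next_timelines[col] += count
--
--         timelines = next_timelines
--
--     total_finished_timelines += sum(timelines.values())
--
--     return total_finished_timelines
-- ===== SOURCE B (Python) =====
-- def solve_quantum_manifold(input_data):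
--     lines = [line for line in input_data.split('\n') if line]
--
--     if not lines:
--         return "Error: Empty input."
--
--     max_len = max(len(line) for line in lines)
--     grid = [line.ljust(max_len) for line in lines]
--
--     start = None
--     for r, line in enumerate(grid):
--         if 'S' in line:
--             start = (r, line.index('S'))
--             break
--
--     if start is None:
--         return 0
--
--     sr, sc = start
--     # Backward DP: ways[c] = finished timelines produced by ONE timeline entering
--     # the current row at column c (out-of-bounds columns count as 1 finished).
--     ways = [1] * max_len
--     for r in range(len(grid) - 1, sr, -1):
--         line = grid[r]
--         nxt = ways
--         ways = [(1 if c == 0 else nxt[c - 1]) + (1 if c == max_len - 1 else nxt[c + 1])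
--                 if line[c] == '^' else nxt[c]
--                 for c in range(max_len)]
--     return ways[sc]
-- ===== Notes on version B (the rewrite author's own statement) =====
-- stated objective: alternative
-- what changed: Replaces the forward row-by-row propagation of a defaultdict of live timeline counts with a backward dynamic program: a table ways[c] of finished-timeline counts per column is rolled up from the bottom row, and the answer is read off at the start column.
-- outside the precondition, e.g. on solve_quantum_manifold(''): A returns 'Error: Empty input.', B returns 'Error: Empty input.'
import Mathlib
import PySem

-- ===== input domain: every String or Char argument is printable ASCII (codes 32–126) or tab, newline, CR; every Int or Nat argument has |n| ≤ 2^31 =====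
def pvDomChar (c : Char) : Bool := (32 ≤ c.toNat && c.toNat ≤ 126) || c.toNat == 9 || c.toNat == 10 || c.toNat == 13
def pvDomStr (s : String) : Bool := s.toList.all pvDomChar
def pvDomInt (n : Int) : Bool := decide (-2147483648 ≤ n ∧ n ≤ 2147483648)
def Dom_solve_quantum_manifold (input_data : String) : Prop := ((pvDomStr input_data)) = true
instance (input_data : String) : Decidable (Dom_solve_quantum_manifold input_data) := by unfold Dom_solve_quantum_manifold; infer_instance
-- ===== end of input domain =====

-- B replaces A's forward propagation of a dict of live timeline counts by a backward
-- per-column DP table; equal return values proved on all inputs with a nonempty line.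

-- ===== PORT A =====
-- front matter shared verbatim by both Pythons: the nonempty lines, the maximal
-- line length, str.ljust, and the first-row-with-'S' scan (enumerate + break)
def pvLines (input_data : String) : List (List Char) :=
  (PySem.Chars.splitOn input_data.toList ['\n']).filter (fun l => l ≠ [])

def pvMaxLen (g : List (List Char)) : Int :=
  (PySem.List.max? (g.map (fun l => (l.length : Int))) (fun x => x)).getD 0
  -- max(len(line) for line in lines); the getD 0 is unreachable (called on g ≠ [])

def pvLjust (maxLen : Int) (cs : List Char) : List Char :=
  cs ++ List.replicate (maxLen.toNat - cs.length) ' '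
  -- line.ljust(max_len); exact here since max_len ≥ len(cs) at every call site

def pvFindS : List (List Char) → Nat → Option (Nat × Int)
  | [], _ => none
  | row :: rest, r =>
    if PySem.Chars.isIn ['S'] row then some (r, PySem.Chars.find row ['S'])
    else pvFindS rest (r + 1)

-- body of A's inner 'for col, count in timelines.items()' loop; state = (next_timelines, total)
def pvStepA (maxLen : Int) (row : List Char) (st : PySem.Dict Int Int × Int)
    (p : Int × Int) : PySem.Dict Int Int × Int :=
  if p.1 < 0 ∨ maxLen ≤ p.1 then (st.1, st.2 + p.2)
  else if PySem.List.pyGetD row p.1 ' ' = '^' then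
    -- current_line[col]: in range (0 ≤ col < max_len = len(row)), so the total read is exact
    ((st.1.modify (p.1 - 1) 0 (· + p.2)).modify (p.1 + 1) 0 (· + p.2), st.2)
  else (st.1.modify p.1 0 (· + p.2), st.2)

-- A's 'for r in range(start_row+1, len(padded_lines))' loop over the remaining rows
def pvLoopA (maxLen : Int) : List (List Char) → PySem.Dict Int Int × Int → Int
  | [], (d, t) => t + d.values.sum
  | row :: rest, (d, t) =>
    if d.items = [] then t + d.values.sum
    else pvLoopA maxLen rest (d.items.foldl (pvStepA maxLen row) (PySem.Dict.empty, t))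

def solve_quantum_manifold (input_data : String) : Int :=
  let lines := pvLines input_data
  if lines = [] then 0  -- A returns the string "Error: Empty input." here; outside Pre_
  else
    let maxLen := pvMaxLen lines
    let padded := lines.map (pvLjust maxLen)
    match pvFindS padded 0 with
    | none => 0
    | some (r, c) =>
      pvLoopA maxLen (padded.drop (r + 1)) (PySem.Dict.empty.insert c 1, 0)

-- ===== PORT B =====
-- one comprehension of B's backward loop: next table → table one row higher
def pvRowB (mN : Nat) (row : List Char) (nxt : List Int) : List Int :=
  (List.range mN).map (fun c =>
    if row.getD c ' ' = '^' then
      -- line[c]: in range (c < max_len = len(row)), so the total read is exact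
      (if c = 0 then 1 else nxt.getD (c - 1) 1) +
      (if c = mN - 1 then 1 else nxt.getD (c + 1) 1)
    else nxt.getD c 1)

def solve_quantum_manifold_alt (input_data : String) : Int :=
  let lines := pvLines input_data
  if lines = [] then 0  -- B returns the string "Error: Empty input." here; outside Pre_
  else
    let maxLen := pvMaxLen lines
    let grid := lines.map (pvLjust maxLen)
    match pvFindS grid 0 with
    | none => 0
    | some (r, c) =>
      -- 'for r in range(len(grid)-1, sr, -1)' consumes the rows below sr bottom-up: a foldr
      let ways := (grid.drop (r + 1)).foldr (pvRowB maxLen.toNat) (List.replicate maxLen.toNat 1)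
      ways.getD c.toNat 0

-- ===== PRECONDITION & SPEC =====
-- Pre_ excludes only inputs without any nonempty line, on which A (and B) return the
-- string "Error: Empty input." instead of an integer.
def Pre_solve_quantum_manifold (input_data : String) : Prop := pvLines input_data ≠ []
instance (input_data : String) : Decidable (Pre_solve_quantum_manifold input_data) := by
  unfold Pre_solve_quantum_manifold; infer_instance

def pvWitness_solve_quantum_manifold : String := "S^\n^ ^"

def Spec_solve_quantum_manifold (input_data : String) (out : Int) : Prop :=
  out = solve_quantum_manifold_alt input_data
instance (input_data : String) (out : Int) : Decidable (Spec_solve_quantum_manifold input_data out) := by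
  unfold Spec_solve_quantum_manifold; infer_instance

-- ===== CLAIM (what is proved, stated in full; the proofs are below) =====
def Claim_equal_solve_quantum_manifold : Prop := ∀ (input_data : String), Dom_solve_quantum_manifold input_data → Pre_solve_quantum_manifold input_data → Spec_solve_quantum_manifold input_data (solve_quantum_manifold input_data)

-- ===== LEMMAS AND PROOFS =====

-- the common semantics both loops compute: finished timelines spawned by one timeline
-- entering the remaining rows at a column
def pvCountB (maxLen : Int) : List (List Char) → Int → Int
  | [], _ => 1
  | row :: rest, col =>
    if col < 0 ∨ maxLen ≤ col then 1
    else if PySem.List.pyGetD row col ' ' = '^' then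
      pvCountB maxLen rest (col - 1) + pvCountB maxLen rest (col + 1)
    else pvCountB maxLen rest col

lemma pvCountB_oob (maxLen : Int) (rows : List (List Char)) (col : Int)
    (h : col < 0 ∨ maxLen ≤ col) : pvCountB maxLen rows col = 1 := by
  cases rows with
  | nil => rfl
  | cons row rest => simp [pvCountB, h]

lemma pvSum_replace (l : List (Int × Int)) (c w : Int) (f : Int → Int)
    (hnd : (l.map Prod.fst).Nodup) (v : Int) (hv : (c, v) ∈ l) :
    ((l.map (fun p => if (p.1 == c) = true then (c, w) else p)).map
        (fun q => q.2 * f q.1)).sum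
      = ((l.map (fun q => q.2 * f q.1)).sum - v * f c) + w * f c := by
  induction l with
  | nil => cases hv
  | cons p tl ih =>
    have hnd2 : (p.1 :: tl.map Prod.fst).Nodup := by simpa using hnd
    have hnd' : (tl.map Prod.fst).Nodup := (List.nodup_cons.mp hnd2).2
    have hhead : p.1 ∉ tl.map Prod.fst := (List.nodup_cons.mp hnd2).1
    rcases List.mem_cons.mp hv with heq | htl
    · have hp1 : p.1 = c := by rw [← heq]
      have hp2 : p.2 = v := by rw [← heq]
      have htlid : tl.map (fun p => if (p.1 == c) = true then (c, w) else p) = tl := by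
        conv_rhs => rw [← List.map_id tl]
        apply List.map_congr_left
        intro q hq
        have hq1 : q.1 ≠ c := by
          intro hqc
          exact hhead (hp1 ▸ hqc ▸ List.mem_map_of_mem hq)
        simp [hq1]
      simp only [List.map_cons, List.sum_cons, htlid, hp1, beq_self_eq_true, if_true]
      rw [hp2]
      ring
    · have hp1 : p.1 ≠ c := by
        intro hpc
        rw [hpc] at hhead
        exact hhead (List.mem_map_of_mem htl)
      simp only [beq_iff_eq] at ih
      simp only [List.map_cons, List.sum_cons, beq_iff_eq, hp1, if_false, ih hnd' htl]
      ring

lemma pvDict_modify_eq_insert (d : PySem.Dict Int Int) (c k : Int) :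
    d.modify c 0 (· + k) = d.insert c (d.getD c 0 + k) := rfl

lemma pvNodup_modify (d : PySem.Dict Int Int) (c k : Int) (h : d.keys.Nodup) :
    (d.modify c 0 (· + k)).keys.Nodup := by
  rw [pvDict_modify_eq_insert]
  exact PySem.Dict.nodup_keys_insert _ _ _ h

lemma pvSum_modify (d : PySem.Dict Int Int) (c k : Int) (f : Int → Int)
    (hnd : d.keys.Nodup) :
    (((d.modify c 0 (· + k)).items).map (fun q => q.2 * f q.1)).sum
      = ((d.items.map (fun q => q.2 * f q.1)).sum) + k * f c := by
  rw [pvDict_modify_eq_insert]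
  by_cases h : d.contains c
  · rw [PySem.Dict.items_insert_of_contains d _ h]
    have hc : ∃ v, d.get? c = some v := by
      have := PySem.Dict.contains_eq_isSome_get? (d := d) (k := c)
      rw [h] at this
      exact Option.isSome_iff_exists.mp this.symm
    obtain ⟨v, hv⟩ := hc
    have hmem : (c, v) ∈ d.items := PySem.Dict.mem_items_of_get?_eq_some _ hv
    have hgd : d.getD c 0 = v := PySem.Dict.getD_of_get?_eq_some _ _ hv
    rw [pvSum_replace d.items c (d.getD c 0 + k) f hnd v hmem, hgd]
    ring
  · rw [PySem.Dict.items_insert_of_not_contains d _ (by simpa using h)]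
    rw [PySem.Dict.getD_of_not_contains _ _ (by simpa using h)]
    simp [List.sum_append]

-- one row of A's loop: folding pvStepA over any item list preserves key uniqueness and
-- moves the weighted pvCountB sum one row down
lemma pvStepA_fold (maxLen : Int) (row : List Char) (rest : List (List Char))
    (l : List (Int × Int)) : ∀ (d : PySem.Dict Int Int) (t : Int), d.keys.Nodup →
    (l.foldl (pvStepA maxLen row) (d, t)).1.keys.Nodup ∧
    (l.foldl (pvStepA maxLen row) (d, t)).2
        + (((l.foldl (pvStepA maxLen row) (d, t)).1.items).map
            (fun q => q.2 * pvCountB maxLen rest q.1)).sum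
      = t + ((d.items.map (fun q => q.2 * pvCountB maxLen rest q.1)).sum)
          + ((l.map (fun p => p.2 * pvCountB maxLen (row :: rest) p.1)).sum) := by
  induction l with
  | nil => intro d t h; exact ⟨h, by simp⟩
  | cons p tl ih =>
    intro d t h
    simp only [List.foldl_cons, List.map_cons, List.sum_cons]
    by_cases h1 : p.1 < 0 ∨ maxLen ≤ p.1
    · have hs : pvStepA maxLen row (d, t) p = (d, t + p.2) := by
        simp [pvStepA, h1]
      rw [hs]
      obtain ⟨hn, he⟩ := ih d (t + p.2) h
      refine ⟨hn, ?_⟩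
      rw [he, pvCountB_oob maxLen (row :: rest) p.1 h1]
      ring
    · by_cases h2 : PySem.List.pyGetD row p.1 ' ' = '^'
      · have hs : pvStepA maxLen row (d, t) p
            = ((d.modify (p.1 - 1) 0 (· + p.2)).modify (p.1 + 1) 0 (· + p.2), t) := by
          simp [pvStepA, h1, h2]
        rw [hs]
        have hn1 := pvNodup_modify d (p.1 - 1) p.2 h
        have hn2 := pvNodup_modify _ (p.1 + 1) p.2 hn1
        obtain ⟨hn, he⟩ := ih _ t hn2
        refine ⟨hn, ?_⟩
        rw [he, pvSum_modify _ _ _ _ hn1, pvSum_modify _ _ _ _ h]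
        have hc : pvCountB maxLen (row :: rest) p.1
            = pvCountB maxLen rest (p.1 - 1) + pvCountB maxLen rest (p.1 + 1) := by
          simp [pvCountB, h1, h2]
        rw [hc]
        ring
      · have hs : pvStepA maxLen row (d, t) p = (d.modify p.1 0 (· + p.2), t) := by
          simp [pvStepA, h1, h2]
        rw [hs]
        have hn1 := pvNodup_modify d p.1 p.2 h
        obtain ⟨hn, he⟩ := ih _ t hn1
        refine ⟨hn, ?_⟩
        rw [he, pvSum_modify _ _ _ _ h]
        have hc : pvCountB maxLen (row :: rest) p.1 = pvCountB maxLen rest p.1 := by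
          simp [pvCountB, h1, h2]
        rw [hc]
        ring

lemma pvLoopA_eq (maxLen : Int) : ∀ (rows : List (List Char)) (d : PySem.Dict Int Int)
    (t : Int), d.keys.Nodup →
    pvLoopA maxLen rows (d, t)
      = t + ((d.items.map (fun q => q.2 * pvCountB maxLen rows q.1)).sum) := by
  intro rows
  induction rows with
  | nil =>
    intro d t _
    show t + d.values.sum = _
    have : d.values = d.items.map (fun q => q.2) := rfl
    rw [this]
    simp [pvCountB]
  | cons row rest ih =>
    intro d t h
    by_cases he : d.items = []
    · have hv : d.values = d.items.map (fun q => q.2) := rfl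
      simp [pvLoopA, he, hv]
    · rw [pvLoopA, if_neg he]
      obtain ⟨hn, hsum⟩ := pvStepA_fold maxLen row rest d.items PySem.Dict.empty t
        PySem.Dict.nodup_keys_empty
      rw [ih _ _ hn]
      rw [hsum]
      have hemp : (PySem.Dict.empty : PySem.Dict Int Int).items = [] := rfl
      simp [hemp]

lemma pvTable_len (mN : Nat) : ∀ (rows : List (List Char)),
    (rows.foldr (pvRowB mN) (List.replicate mN 1)).length = mN := by
  intro rows
  induction rows with
  | nil => simp
  | cons row rest ih => simp [pvRowB]

lemma pvTable_eq (maxLen : Int) (h0 : 0 ≤ maxLen) : ∀ (rows : List (List Char))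
    (c : Nat), c < maxLen.toNat → ∀ (dflt : Int),
    (rows.foldr (pvRowB maxLen.toNat) (List.replicate maxLen.toNat 1)).getD c dflt
      = pvCountB maxLen rows (c : Int) := by
  intro rows
  induction rows with
  | nil =>
    intro c hc dflt
    rw [List.getD_eq_getElem _ _ (by simpa using hc)]
    simp [pvCountB]
  | cons row rest ih =>
    intro c hc dflt
    have hin : ¬((c : Int) < 0 ∨ maxLen ≤ (c : Int)) := by omega
    have hlen : (rest.foldr (pvRowB maxLen.toNat) (List.replicate maxLen.toNat 1)).length
        = maxLen.toNat := pvTable_len _ _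
    have hget : (((row :: rest).foldr (pvRowB maxLen.toNat)
          (List.replicate maxLen.toNat 1))).getD c dflt
        = (if row.getD c ' ' = '^' then
            (if c = 0 then 1 else (rest.foldr (pvRowB maxLen.toNat)
              (List.replicate maxLen.toNat 1)).getD (c - 1) 1) +
            (if c = maxLen.toNat - 1 then 1 else (rest.foldr (pvRowB maxLen.toNat)
              (List.replicate maxLen.toNat 1)).getD (c + 1) 1)
          else (rest.foldr (pvRowB maxLen.toNat)
              (List.replicate maxLen.toNat 1)).getD c 1) := by
      rw [List.foldr_cons]
      unfold pvRowB
      rw [List.getD_eq_getElem _ _ (by simpa using hc)]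
      simp
    rw [hget]
    have hchar : PySem.List.pyGetD row (c : Int) ' ' = row.getD c ' ' :=
      PySem.List.pyGetD_natCast row c ' '
    by_cases hch : row.getD c ' ' = '^'
    · rw [if_pos hch]
      have hcount : pvCountB maxLen (row :: rest) (c : Int)
          = pvCountB maxLen rest ((c : Int) - 1) + pvCountB maxLen rest ((c : Int) + 1) := by
        simp only [pvCountB]
        rw [if_neg hin, if_pos (by rw [hchar]; exact hch)]
      rw [hcount]
      congr 1
      · by_cases hz : c = 0
        · subst hz
          rw [if_pos rfl, pvCountB_oob maxLen rest _ (by left; simp)]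
        · rw [if_neg hz]
          have : ((c - 1 : Nat) : Int) = (c : Int) - 1 := by omega
          rw [← this]
          exact ih (c - 1) (by omega) 1
      · by_cases hl : c = maxLen.toNat - 1
        · rw [if_pos hl]
          rw [pvCountB_oob maxLen rest _ (by right; omega)]
        · rw [if_neg hl]
          have : ((c + 1 : Nat) : Int) = (c : Int) + 1 := by omega
          rw [← this]
          exact ih (c + 1) (by omega) 1
    · rw [if_neg hch]
      have hcount : pvCountB maxLen (row :: rest) (c : Int)
          = pvCountB maxLen rest (c : Int) := by
        simp only [pvCountB]
        rw [if_neg hin, if_neg (by rw [hchar]; exact hch)]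
      rw [hcount]
      exact ih c hc 1

lemma pvFindS_mem : ∀ (g : List (List Char)) (i : Nat) (r : Nat) (c : Int),
    pvFindS g i = some (r, c) →
    ∃ row ∈ g, PySem.Chars.isIn ['S'] row = true ∧ c = PySem.Chars.find row ['S'] := by
  intro g
  induction g with
  | nil => intro i r c h; cases h
  | cons row rest ih =>
    intro i r c h
    unfold pvFindS at h
    by_cases hs : PySem.Chars.isIn ['S'] row = true
    · rw [if_pos hs] at h
      simp only [Option.some.injEq, Prod.mk.injEq] at h
      exact ⟨row, List.mem_cons_self, hs, h.2.symm⟩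
    · rw [if_neg hs] at h
      obtain ⟨row', hm, hrest⟩ := ih (i + 1) r c h
      exact ⟨row', List.mem_cons_of_mem _ hm, hrest⟩

lemma pvFind_bounds (row : List Char) (hs : PySem.Chars.isIn ['S'] row = true) :
    0 ≤ PySem.Chars.find row ['S'] ∧ (PySem.Chars.find row ['S']).toNat < row.length := by
  have h0 : 0 ≤ PySem.Chars.find row ['S'] :=
    (PySem.Chars.find_nonneg_iff row ['S']).mpr ((PySem.Chars.isIn_iff_infix _ _).mp hs)
  obtain ⟨hpre, -⟩ := PySem.Chars.find_spec h0
  have hne : row.drop (PySem.Chars.find row ['S']).toNat ≠ [] := by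
    intro hnil
    rw [hnil] at hpre
    simpa using hpre.length_le
  rw [ne_eq, List.drop_eq_nil_iff] at hne
  exact ⟨h0, by omega⟩

lemma pvMaxLen_bound (g : List (List Char)) (l : List Char) (hl : l ∈ g) :
    (l.length : Int) ≤ pvMaxLen g := by
  cases hm : PySem.List.max? (g.map (fun l => (l.length : Int))) (fun x => x) with
  | none =>
    rw [PySem.List.max?_eq_none_iff, List.map_eq_nil_iff] at hm
    subst hm
    cases hl
  | some m =>
    have := PySem.List.max?_isMax hm (l.length : Int) (List.mem_map_of_mem hl)
    simpa [pvMaxLen, hm] using this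

-- ===== VERDICT (by name: the statement is the Claim_ definition above) =====
theorem solve_quantum_manifold_spec : Claim_equal_solve_quantum_manifold := by
  intro input_data _ hpre
  show solve_quantum_manifold input_data = solve_quantum_manifold_alt input_data
  simp only [solve_quantum_manifold, solve_quantum_manifold_alt, if_neg hpre]
  cases hf : pvFindS ((pvLines input_data).map (pvLjust (pvMaxLen (pvLines input_data)))) 0 with
  | none => rfl
  | some rc =>
    obtain ⟨r, c⟩ := rc
    set lines := pvLines input_data with hlines
    set maxLen := pvMaxLen lines with hml
    set padded := lines.map (pvLjust maxLen) with hpad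
    show pvLoopA maxLen (padded.drop (r + 1)) (PySem.Dict.empty.insert c 1, 0)
      = (List.foldr (pvRowB maxLen.toNat) (List.replicate maxLen.toNat 1) (padded.drop (r + 1))).getD c.toNat 0
    obtain ⟨row, hrow, hisin, hcfind⟩ := pvFindS_mem padded 0 r c hf
    obtain ⟨l, hlmem, hlj⟩ := List.mem_map.mp hrow
    have hlle : (l.length : Int) ≤ maxLen := pvMaxLen_bound lines l hlmem
    have h0 : 0 ≤ maxLen := le_trans (by positivity) hlle
    have hrowlen : row.length = maxLen.toNat := by
      rw [← hlj]
      simp [pvLjust]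
      omega
    obtain ⟨hc0, hclen⟩ := pvFind_bounds row hisin
    rw [← hcfind] at hc0 hclen
    have hcn : c.toNat < maxLen.toNat := by rw [← hrowlen]; exact hclen
    have hnodup : (PySem.Dict.empty.insert c (1 : Int)).keys.Nodup :=
      PySem.Dict.nodup_keys_insert _ _ _ PySem.Dict.nodup_keys_empty
    rw [pvLoopA_eq maxLen (padded.drop (r + 1)) _ 0 hnodup]
    rw [PySem.Dict.items_insert_of_not_contains _ _ (by simp)]
    rw [pvTable_eq maxLen h0 (padded.drop (r + 1)) c.toNat hcn 0]
    rw [Int.toNat_of_nonneg hc0]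
    have hemp : (PySem.Dict.empty : PySem.Dict Int Int).items = [] := rfl
    simp [hemp]
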